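-- pv_equiv track=rewrite | github.com/Lyther/PerfectlyBalancedShipSections | scripts/fix_section_errors.py | find_best_entity
-- ===== SOURCE A (Python) =====
-- def find_best_entity(
--     needed_locators: set[str],
--     current_entity: str,
--     ship_type: str,
--     slot: str,
--     entity_locators: dict,
--     ship_slot_entities: dict,
-- ) -> str | None:
--     """
--     Find a better entity that has all needed locators.
--     Prefer entities from the same ship_type and slot.
--     """
--     # Get candidate entities for this ship type and slot
--     candidates = []
--     if ship_type in ship_slot_entities and slot in ship_slot_entities[ship_type]:
--         candidates = ship_slot_entities[ship_type][slot]
--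
--     # Only consider valid context entities; otherwise keep current and remap locators.
--     if not candidates:
--         return None
--
--     base_pattern = current_entity.replace("_entity", "").split("_")[0]
--
--     best_match = None
--     best_score = 0
--
--     for entity in candidates:
--         locators = entity_locators.get(entity, set())
--         if not locators:
--             continue
--
--         # Check how many needed locators this entity has
--         matching = needed_locators & locators
--         score = len(matching)
--
--         # Bonus for similar naming
--         if base_pattern in entity:
--             score += 5
--
--         # Must have all needed locators
--         if matching == needed_locators and score > best_score:
--             best_score = score
--             best_match = entity
--
--     return best_match if best_match != current_entity else None
-- ===== SOURCE B (Python) =====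
-- def find_best_entity(
--     needed_locators: set[str],
--     current_entity: str,
--     ship_type: str,
--     slot: str,
--     entity_locators: dict,
--     ship_slot_entities: dict,
-- ) -> str | None:
--     candidates = ship_slot_entities.get(ship_type, {}).get(slot, [])
--     if not candidates:
--         return None
--
--     base_pattern = current_entity.replace("_entity", "").split("_")[0]
--
--     # Entities whose locator set is non-empty and covers all needed locators.
--     qualifying = [e for e in candidates
--                   if entity_locators.get(e) and needed_locators <= entity_locators[e]]
--
--     # Prefer a name match; otherwise take the first covering entity.
--     best = next((e for e in qualifying if base_pattern in e),
--                 qualifying[0] if qualifying else None)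
--
--     return best if best != current_entity else None
-- ===== Notes on version B (the rewrite author's own statement) =====
-- stated objective: simpler
-- what changed: Replaces the scoring loop with best_match/best_score state by a filter of covering candidates followed by two first-match rules (first name match, else first covering entity), making the implicit score arithmetic explicit selection rules.
-- intended difference: When needed_locators is empty and some candidate (other than current_entity in first position) has non-empty locators but no covering candidate contains the naming pattern, A returns None (every score stays 0 and never exceeds best_score, an artifact of its '> 0' threshold) while B returns the first locator-bearing candidate, the intended value since an empty requirement is satisfied by any candidate. — e.g. on find_best_entity([], "x", "s", "t", [("e", ["l"])], [("s", [("t", ["e"])])]): A returns none, B returns some "e"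
import Mathlib
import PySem

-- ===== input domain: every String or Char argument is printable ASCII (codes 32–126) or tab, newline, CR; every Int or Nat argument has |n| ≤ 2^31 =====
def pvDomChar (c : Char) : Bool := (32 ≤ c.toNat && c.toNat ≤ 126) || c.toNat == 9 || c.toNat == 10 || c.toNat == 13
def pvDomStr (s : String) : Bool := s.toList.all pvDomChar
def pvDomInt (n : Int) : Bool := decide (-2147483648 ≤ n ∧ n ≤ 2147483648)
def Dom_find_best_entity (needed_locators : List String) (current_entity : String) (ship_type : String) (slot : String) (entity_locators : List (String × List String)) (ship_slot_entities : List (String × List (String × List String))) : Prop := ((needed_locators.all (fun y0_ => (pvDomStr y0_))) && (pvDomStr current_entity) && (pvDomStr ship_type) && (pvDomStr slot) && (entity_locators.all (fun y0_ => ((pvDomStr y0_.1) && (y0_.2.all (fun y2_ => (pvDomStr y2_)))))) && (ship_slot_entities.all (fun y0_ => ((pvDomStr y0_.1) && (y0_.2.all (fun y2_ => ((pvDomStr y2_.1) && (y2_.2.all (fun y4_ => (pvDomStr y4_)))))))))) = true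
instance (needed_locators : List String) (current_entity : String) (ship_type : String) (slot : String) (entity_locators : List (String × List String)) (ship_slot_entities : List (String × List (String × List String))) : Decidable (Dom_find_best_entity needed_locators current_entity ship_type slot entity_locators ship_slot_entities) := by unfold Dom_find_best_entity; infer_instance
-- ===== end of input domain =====

-- ===== PORT A =====
-- B replaces A's score bookkeeping by explicit first-match selection rules (objective: simpler).
-- fbeGet: Python's dict.get(k, d) on an association list (shared by both ports and D_).
def fbeGet {ν : Type} (l : List (String × ν)) (k : String) (d : ν) : ν :=
  PySem.Dict.getD (PySem.Dict.mk l) k d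

-- fbePattern: current_entity.replace("_entity", "").split("_")[0]; split by a non-empty
-- separator is always non-empty, so [0] is its head (shared by both ports and D_).
def fbePattern (current_entity : String) : String :=
  ((PySem.Str.split? (PySem.Str.replace current_entity "_entity" "") "_").getD []).headD ""

-- fbeStep: the body of A's 'for entity in candidates' loop (state = (best_match, best_score)).
def fbeStep (entity_locators : List (String × List String)) (needed_locators : List String)
    (base_pattern : String) (st : Option String × Int) (entity : String) : Option String × Int :=
  let locators := fbeGet entity_locators entity []
  if locators.isEmpty then st
  else
    let matching := PySem.Set.inter needed_locators locators
    let score0 : Int := (matching.length : Int)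
    let score : Int := if PySem.Str.isIn base_pattern entity then score0 + 5 else score0
    if PySem.Set.equal matching needed_locators && decide (score > st.2) then (some entity, score)
    else st

def find_best_entity (needed_locators : List String) (current_entity : String) (ship_type : String) (slot : String) (entity_locators : List (String × List String)) (ship_slot_entities : List (String × List (String × List String))) : Option String :=
  let candidates :=
    if PySem.Dict.contains (PySem.Dict.mk ship_slot_entities) ship_type then
      if PySem.Dict.contains (PySem.Dict.mk (fbeGet ship_slot_entities ship_type [])) slot then
        fbeGet (fbeGet ship_slot_entities ship_type []) slot []
      else []
    else []
  if candidates.isEmpty then none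
  else
    let base_pattern := fbePattern current_entity
    let r := candidates.foldl (fbeStep entity_locators needed_locators base_pattern) (none, 0)
    if r.1 = some current_entity then none else r.1

-- ===== PORT B =====
-- fbeCovers: entity_locators.get(e) is truthy (non-empty) and needed_locators <= it.
def fbeCovers (entity_locators : List (String × List String)) (needed_locators : List String)
    (e : String) : Bool :=
  let locs := fbeGet entity_locators e []
  !locs.isEmpty && PySem.Set.issubset needed_locators locs

def find_best_entity_alt (needed_locators : List String) (current_entity : String) (ship_type : String) (slot : String) (entity_locators : List (String × List String)) (ship_slot_entities : List (String × List (String × List String))) : Option String :=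
  let candidates := fbeGet (fbeGet ship_slot_entities ship_type []) slot []
  if candidates.isEmpty then none
  else
    let base_pattern := fbePattern current_entity
    let qualifying := candidates.filter (fbeCovers entity_locators needed_locators)
    let best :=
      match qualifying.find? (fun e => PySem.Str.isIn base_pattern e) with
      | some e => some e
      | none => qualifying.head?
    if best = some current_entity then none else best

-- ===== PRECONDITION & SPEC =====
-- When needed_locators is empty, some candidate has non-empty locators, no such candidate
-- contains the naming pattern, and the first such candidate is not current_entity, A returns
-- None (every score stays 0 and never exceeds best_score, an artifact of its '> 0' threshold)
-- while B returns that first locator-bearing candidate, the intended value since an empty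
-- requirement is satisfied by any candidate.
def D_find_best_entity (needed_locators : List String) (current_entity : String) (ship_type : String) (slot : String) (entity_locators : List (String × List String)) (ship_slot_entities : List (String × List (String × List String))) : Prop :=
  let cands := fbeGet (fbeGet ship_slot_entities ship_type []) slot []
  needed_locators = [] ∧
    (∀ e ∈ cands, (fbeGet entity_locators e []).isEmpty = false →
      PySem.Str.isIn (fbePattern current_entity) e = false) ∧
    (cands.dropWhile (fun e => (fbeGet entity_locators e []).isEmpty)).headD current_entity ≠ current_entity
instance (needed_locators : List String) (current_entity : String) (ship_type : String) (slot : String) (entity_locators : List (String × List String)) (ship_slot_entities : List (String × List (String × List String))) : Decidable (D_find_best_entity needed_locators current_entity ship_type slot entity_locators ship_slot_entities) := by unfold D_find_best_entity; infer_instance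

def Spec_find_best_entity (needed_locators : List String) (current_entity : String) (ship_type : String) (slot : String) (entity_locators : List (String × List String)) (ship_slot_entities : List (String × List (String × List String))) (out : Option String) : Prop := ¬ D_find_best_entity needed_locators current_entity ship_type slot entity_locators ship_slot_entities → out = find_best_entity_alt needed_locators current_entity ship_type slot entity_locators ship_slot_entities
instance (needed_locators : List String) (current_entity : String) (ship_type : String) (slot : String) (entity_locators : List (String × List String)) (ship_slot_entities : List (String × List (String × List String))) (out : Option String) : Decidable (Spec_find_best_entity needed_locators current_entity ship_type slot entity_locators ship_slot_entities out) := by unfold Spec_find_best_entity; infer_instance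

def pvDiffWitness_find_best_entity : List String × String × String × String × (List (String × List String)) × (List (String × List (String × List String))) :=
  ([], "x", "s", "t", [("e", ["l"])], [("s", [("t", ["e"])])])
def pvDiffWitnessOut_find_best_entity : (Option String) × (Option String) := (none, some "e")

-- ===== CLAIM (what is proved, stated in full; the proofs are below) =====
def Claim_unchanged_find_best_entity : Prop := ∀ (needed_locators : List String) (current_entity : String) (ship_type : String) (slot : String) (entity_locators : List (String × List String)) (ship_slot_entities : List (String × List (String × List String))), Dom_find_best_entity needed_locators current_entity ship_type slot entity_locators ship_slot_entities → Spec_find_best_entity needed_locators current_entity ship_type slot entity_locators ship_slot_entities (find_best_entity needed_locators current_entity ship_type slot entity_locators ship_slot_entities)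
def Claim_changed_find_best_entity : Prop := Dom_find_best_entity (pvDiffWitness_find_best_entity.1) (pvDiffWitness_find_best_entity.2.1) (pvDiffWitness_find_best_entity.2.2.1) (pvDiffWitness_find_best_entity.2.2.2.1) (pvDiffWitness_find_best_entity.2.2.2.2.1) (pvDiffWitness_find_best_entity.2.2.2.2.2) ∧ D_find_best_entity (pvDiffWitness_find_best_entity.1) (pvDiffWitness_find_best_entity.2.1) (pvDiffWitness_find_best_entity.2.2.1) (pvDiffWitness_find_best_entity.2.2.2.1) (pvDiffWitness_find_best_entity.2.2.2.2.1) (pvDiffWitness_find_best_entity.2.2.2.2.2) ∧ find_best_entity (pvDiffWitness_find_best_entity.1) (pvDiffWitness_find_best_entity.2.1) (pvDiffWitness_find_best_entity.2.2.1) (pvDiffWitness_find_best_entity.2.2.2.1) (pvDiffWitness_find_best_entity.2.2.2.2.1) (pvDiffWitness_find_best_entity.2.2.2.2.2) = pvDiffWitnessOut_find_best_entity.1 ∧ find_best_entity_alt (pvDiffWitness_find_best_entity.1) (pvDiffWitness_find_best_entity.2.1) (pvDiffWitness_find_best_entity.2.2.1) (pvDiffWitness_find_best_entity.2.2.2.1)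 (pvDiffWitness_find_best_entity.2.2.2.2.1) (pvDiffWitness_find_best_entity.2.2.2.2.2) = pvDiffWitnessOut_find_best_entity.2 ∧ pvDiffWitnessOut_find_best_entity.1 ≠ pvDiffWitnessOut_find_best_entity.2
def Claim_exact_find_best_entity : Prop := ∀ (needed_locators : List String) (current_entity : String) (ship_type : String) (slot : String) (entity_locators : List (String × List String)) (ship_slot_entities : List (String × List (String × List String))), Dom_find_best_entity needed_locators current_entity ship_type slot entity_locators ship_slot_entities → D_find_best_entity needed_locators current_entity ship_type slot entity_locators ship_slot_entities → find_best_entity needed_locators current_entity ship_type slot entity_locators ship_slot_entities ≠ find_best_entity_alt needed_locators current_entity ship_type slot entity_locators ship_slot_entities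

-- ===== LEMMAS AND PROOFS =====

theorem fbe_find?_filter_and {α : Type} (l : List α) (p q : α → Bool) :
    (l.filter p).find? q = l.find? (fun a => p a && q a) := by
  rw [List.find?_filter]; congr 1; funext a; simp

theorem fbe_set_equal_inter (s t : List String) :
    PySem.Set.equal (PySem.Set.inter s t) s = PySem.Set.issubset s t := by
  rw [Bool.eq_iff_iff, PySem.Set.equal_iff, PySem.Set.issubset_iff]
  constructor
  · intro h x hx
    have hm := (h x).mpr hx
    rw [PySem.Set.mem_inter] at hm
    exact hm.2
  · intro h x
    rw [PySem.Set.mem_inter]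
    exact ⟨fun a => a.1, fun hx => ⟨hx, h x hx⟩⟩

theorem fbe_set_inter_of_subset (s t : List String)
    (h : PySem.Set.issubset s t = true) : PySem.Set.inter s t = s := by
  rw [PySem.Set.issubset_iff] at h
  show s.filter (fun x => PySem.Set.contains t x) = s
  rw [List.filter_eq_self]
  intro a ha
  rw [PySem.Set.contains_iff]
  exact h a ha

-- With no needed locators, covering reduces to having locators at all.
theorem fbeCovers_nil (el : List (String × List String)) (e : String) :
    fbeCovers el [] e = !(fbeGet el e []).isEmpty := by
  unfold fbeCovers
  have : PySem.Set.issubset [] (fbeGet el e []) = true := by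
    rw [PySem.Set.issubset_iff]; intro x hx; simp at hx
  simp [this]

theorem fbe_find?_eq_head?_dropWhile {α : Type} (l : List α) (p : α → Bool) :
    l.find? p = (l.dropWhile (fun a => !p a)).head? := by
  induction l with
  | nil => rfl
  | cons a l ih => by_cases h : p a <;> simp [h, ih]

-- D_ restated through the ports' primitives (used by both proofs below)
theorem fbeD_iff (nd : List String) (cur st sl : String)
    (el : List (String × List String)) (sse : List (String × List (String × List String))) :
    D_find_best_entity nd cur st sl el sse ↔
      (nd = [] ∧
        (fbeGet (fbeGet sse st []) sl []).find?
          (fun e => fbeCovers el nd e && PySem.Str.isIn (fbePattern cur) e) = none ∧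
        (((fbeGet (fbeGet sse st []) sl []).find?
          (fbeCovers el nd)).any (fun e => decide (e ≠ cur))) = true) := by
  unfold D_find_best_entity
  constructor
  · rintro ⟨rfl, h2, h3⟩
    refine ⟨rfl, ?_, ?_⟩
    · rw [List.find?_eq_none]
      intro x hx
      rw [fbeCovers_nil]
      intro hc
      rw [Bool.and_eq_true, Bool.not_eq_eq_eq_not, Bool.not_true] at hc
      have := h2 x hx hc.1
      rw [this] at hc
      exact Bool.false_ne_true hc.2
    · rw [List.headD_eq_head?_getD,
        show (fun e => ((fbeGet el e []).isEmpty) : String → Bool) = (fun e => !(fbeCovers el ([] : List String) e)) from by funext x; rw [fbeCovers_nil, Bool.not_not],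
        ← fbe_find?_eq_head?_dropWhile] at h3
      cases hfe : List.find? (fbeCovers el []) (fbeGet (fbeGet sse st []) sl []) with
      | none => rw [hfe] at h3; exact absurd rfl h3
      | some e => rw [hfe] at h3; simpa using h3
  · rintro ⟨rfl, h2, h3⟩
    refine ⟨rfl, ?_, ?_⟩
    · rw [List.find?_eq_none] at h2
      intro e he hloc
      have := h2 e he
      rw [fbeCovers_nil] at this
      simp only [Bool.and_eq_true, not_and, Bool.not_eq_eq_eq_not, Bool.not_true] at this
      exact Bool.eq_false_iff.mpr (fun h => (this hloc) h)
    · rw [List.headD_eq_head?_getD,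
        show (fun e => ((fbeGet el e []).isEmpty) : String → Bool) = (fun e => !(fbeCovers el ([] : List String) e)) from by funext x; rw [fbeCovers_nil, Bool.not_not],
        ← fbe_find?_eq_head?_dropWhile]
      cases hfe : List.find? (fbeCovers el []) (fbeGet (fbeGet sse st []) sl []) with
      | none => rw [hfe] at h3; simp at h3
      | some e => rw [hfe] at h3; simpa using h3

-- A's loop body, re-expressed through B's qualifying test and the two possible scores.
theorem fbeStep_eq (el : List (String × List String)) (nd : List String) (bp : String)
    (st : Option String × Int) (e : String) :
    fbeStep el nd bp st e =
      if fbeCovers el nd e then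
        (if (if PySem.Str.isIn bp e then (nd.length : Int) + 5 else (nd.length : Int)) > st.2
         then (some e, if PySem.Str.isIn bp e then (nd.length : Int) + 5 else (nd.length : Int))
         else st)
      else st := by
  unfold fbeStep fbeCovers
  by_cases hemp : (fbeGet el e []).isEmpty
  · simp [hemp]
  · by_cases hsub : PySem.Set.issubset nd (fbeGet el e []) = true
    · have hint := fbe_set_inter_of_subset nd _ hsub
      have heq := fbe_set_equal_inter nd (fbeGet el e [])
      rw [hsub] at heq
      simp only [hemp, hint, Bool.not_false, hsub, Bool.and_self, if_true]
      split <;> split <;> simp_all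
    · have heq := fbe_set_equal_inter nd (fbeGet el e [])
      rw [eq_false_of_ne_true hsub] at heq
      simp [hemp, heq, hsub]

-- Once best_score is needed.length + 5 no later candidate can beat it.
theorem fbeLoop_top (el : List (String × List String)) (nd : List String) (bp : String)
    (cs : List String) (st : Option String × Int)
    (h : st.2 = (nd.length : Int) + 5) :
    cs.foldl (fbeStep el nd bp) st = st := by
  induction cs with
  | nil => rfl
  | cons c cs ih =>
    have hstep : fbeStep el nd bp st c = st := by
      rw [fbeStep_eq]
      split
      · apply if_neg
        rw [h]; split <;> omega
      · rfl
    rw [List.foldl_cons, hstep]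
    exact ih

-- With a non-matching best of score needed.length, only the first name match replaces it.
theorem fbeLoop_some (el : List (String × List String)) (nd : List String) (bp : String)
    (cs : List String) (e : String) :
    cs.foldl (fbeStep el nd bp) (some e, (nd.length : Int)) =
      (match cs.find? (fun c => fbeCovers el nd c && PySem.Str.isIn bp c) with
       | some c => (some c, (nd.length : Int) + 5)
       | none => (some e, (nd.length : Int))) := by
  induction cs generalizing e with
  | nil => rfl
  | cons c cs ih =>
    rw [List.foldl_cons, fbeStep_eq]
    by_cases hcov : fbeCovers el nd c
    · by_cases hm : PySem.Str.isIn bp c = true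
      · rw [if_pos hcov, if_pos hm,
          if_pos (show (nd.length : Int) + 5 > (some e, (nd.length : Int)).2 by show (nd.length : Int) + 5 > (nd.length : Int); omega),
          List.find?_cons_of_pos (by simp only [hcov, Bool.true_and]; exact hm),
          fbeLoop_top el nd bp cs _ rfl]
      · rw [if_pos hcov, if_neg hm,
          if_neg (show ¬((nd.length : Int) > (some e, (nd.length : Int)).2) by show ¬((nd.length : Int) > (nd.length : Int)); omega),
          List.find?_cons_of_neg (by simp only [hcov, Bool.true_and]; exact hm)]
        exact ih e
    · rw [if_neg hcov,
        List.find?_cons_of_neg (by simp [hcov])]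
      exact ih e

-- The whole loop from the initial state (None, 0).
theorem fbeLoop_none (el : List (String × List String)) (nd : List String) (bp : String)
    (cs : List String) :
    (cs.foldl (fbeStep el nd bp) (none, 0)).1 =
      (match cs.find? (fun c => fbeCovers el nd c && PySem.Str.isIn bp c) with
       | some c => some c
       | none => if !nd.isEmpty then cs.find? (fbeCovers el nd) else none) := by
  induction cs with
  | nil => cases nd <;> rfl
  | cons c cs ih =>
    rw [List.foldl_cons, fbeStep_eq]
    by_cases hcov : fbeCovers el nd c
    · by_cases hm : PySem.Str.isIn bp c = true
      · rw [if_pos hcov, if_pos hm,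
          if_pos (show (nd.length : Int) + 5 > ((none : Option String), (0 : Int)).2 by show (nd.length : Int) + 5 > 0; omega),
          List.find?_cons_of_pos (by simp only [hcov, Bool.true_and]; exact hm),
          fbeLoop_top el nd bp cs _ rfl]
      · rw [if_pos hcov, if_neg hm,
          List.find?_cons_of_neg (by simp only [hcov, Bool.true_and]; exact hm)]
        by_cases hnd : nd.isEmpty
        · have hz : nd.length = 0 := by simpa [List.isEmpty_iff] using hnd
          rw [if_neg (show ¬((nd.length : Int) > ((none : Option String), (0 : Int)).2) by show ¬((nd.length : Int) > 0); omega),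
            ih, hnd]
          cases h : cs.find? (fun c => fbeCovers el nd c && PySem.Str.isIn bp c) <;> simp
        · have hpos : 0 < nd.length := by
            cases nd with
            | nil => simp at hnd
            | cons a l => simp
          rw [if_pos (show (nd.length : Int) > ((none : Option String), (0 : Int)).2 by show (nd.length : Int) > 0; omega),
            fbeLoop_some, List.find?_cons_of_pos hcov]
          cases h : cs.find? (fun c => fbeCovers el nd c && PySem.Str.isIn bp c) <;>
            simp [hnd]
    · rw [if_neg hcov,
        List.find?_cons_of_neg (by simp [hcov]),
        List.find?_cons_of_neg (by simp [hcov])]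
      exact ih

-- A's guarded two-level candidate lookup equals B's chained .get defaults.
theorem fbeCandidates_eq (sse : List (String × List (String × List String)))
    (ship_type slot : String) :
    (if PySem.Dict.contains (PySem.Dict.mk sse) ship_type then
       (if PySem.Dict.contains (PySem.Dict.mk (fbeGet sse ship_type [])) slot
        then fbeGet (fbeGet sse ship_type []) slot []
        else [])
     else []) =
    fbeGet (fbeGet sse ship_type []) slot [] := by
  by_cases h1 : PySem.Dict.contains (PySem.Dict.mk sse) ship_type
  · rw [if_pos h1]
    by_cases h2 : PySem.Dict.contains (PySem.Dict.mk (fbeGet sse ship_type [])) slot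
    · rw [if_pos h2]
    · rw [if_neg h2]
      exact (PySem.Dict.getD_of_not_contains _ [] (eq_false_of_ne_true h2)).symm
  · rw [if_neg h1]
    have h0 : fbeGet sse ship_type ([] : List (String × List String)) = [] :=
      PySem.Dict.getD_of_not_contains _ [] (eq_false_of_ne_true h1)
    rw [show fbeGet (fbeGet sse ship_type []) slot ([] : List String) = fbeGet [] slot [] from by rw [h0]]
    rfl

theorem fbe_eq (needed_locators : List String) (current_entity : String)
    (ship_type : String) (slot : String)
    (entity_locators : List (String × List String))
    (ship_slot_entities : List (String × List (String × List String)))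
    (hD : ¬ D_find_best_entity needed_locators current_entity ship_type slot entity_locators ship_slot_entities) :
    find_best_entity needed_locators current_entity ship_type slot entity_locators ship_slot_entities =
      find_best_entity_alt needed_locators current_entity ship_type slot entity_locators ship_slot_entities := by
  unfold find_best_entity find_best_entity_alt
  rw [fbeD_iff] at hD
  simp only [fbeCandidates_eq]
  set cs := fbeGet (fbeGet ship_slot_entities ship_type []) slot [] with hcs
  by_cases h : cs.isEmpty
  · simp only [h, if_true]
  · simp only [h, Bool.false_eq_true, if_false]
    rw [fbeLoop_none, fbe_find?_filter_and, List.head?_filter]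
    cases hf : cs.find? (fun c => fbeCovers entity_locators needed_locators c && PySem.Str.isIn (fbePattern current_entity) c) with
    | some c => rfl
    | none =>
      by_cases hnd : needed_locators.isEmpty
      · -- nd empty: A's loop result is none; B's best is cs.find? covers
        have hnil : needed_locators = [] := by simpa [List.isEmpty_iff] using hnd
        simp only [hnd, Bool.not_true, Bool.false_eq_true, if_false]
        cases hg : cs.find? (fbeCovers entity_locators needed_locators) with
        | none => rfl
        | some e =>
          -- ¬D_ forces e = current_entity, so B also returns none
          have he : e = current_entity := by
            by_contra hne
            exact hD ⟨hnil, hf, by rw [hg]; simp [hne]⟩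
          simp [he]
      · simp [hnd]

-- ===== VERDICT (by name: the statement is the Claim_ definition above) =====
theorem find_best_entity_spec : Claim_unchanged_find_best_entity := by
  intro needed_locators current_entity ship_type slot entity_locators ship_slot_entities _
  unfold Spec_find_best_entity
  intro hD
  exact fbe_eq needed_locators current_entity ship_type slot entity_locators ship_slot_entities hD

theorem find_best_entity_changed : Claim_changed_find_best_entity := by
  unfold Claim_changed_find_best_entity; decide

theorem find_best_entity_tight : Claim_exact_find_best_entity := by
  intro needed_locators current_entity ship_type slot entity_locators ship_slot_entities _ hD
  rw [fbeD_iff] at hD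
  obtain ⟨hnil, hf, hg⟩ := hD
  unfold find_best_entity find_best_entity_alt
  simp only [fbeCandidates_eq]
  set cs := fbeGet (fbeGet ship_slot_entities ship_type []) slot [] with hcs
  cases hgf : cs.find? (fbeCovers entity_locators needed_locators) with
  | none => rw [hgf] at hg; simp at hg
  | some e =>
    rw [hgf] at hg
    have hne : e ≠ current_entity := by simpa using hg
    have hnil' : cs ≠ [] := by intro h; rw [h] at hgf; simp at hgf
    have hcsne : cs.isEmpty = false := by simp [hnil']
    simp only [hcsne, Bool.false_eq_true, if_false]
    rw [fbeLoop_none, fbe_find?_filter_and, List.head?_filter]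
    rw [hf, hgf]
    have hnd : needed_locators.isEmpty = true := by simp [hnil]
    simp only [hnd, Bool.not_true, Bool.false_eq_true, if_false]
    simp [hne]
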